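-- pv_equiv track=rewrite | github.com/4fthaab/aim26prep | Leetcode Solutions/Weight Compresion Rank.py | compareRanks
-- ===== SOURCE A (Python) =====
-- def compareRanks(ranks):
--     values=sorted(set(ranks))
--     li={}
--     i=1
--     for num in values:
--         li[num]=i
--         i+=1
--     result=[]
--     for num in ranks:
--         result.append(li[num])
--     return result
-- ===== SOURCE B (Python) =====
-- def compareRanks(ranks):
--     # rank of x = 1 + number of distinct values strictly below x; no sort, no dict
--     return [len({v for v in ranks if v < x}) + 1 for x in ranks]
-- ===== Notes on version B (the rewrite author's own statement) =====
-- stated objective: simpler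
-- what changed: B drops the sort, the rank dict and both passes: each element's rank is computed directly as 1 + the size of the set of distinct values strictly below it, in a single comprehension.
import Mathlib
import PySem

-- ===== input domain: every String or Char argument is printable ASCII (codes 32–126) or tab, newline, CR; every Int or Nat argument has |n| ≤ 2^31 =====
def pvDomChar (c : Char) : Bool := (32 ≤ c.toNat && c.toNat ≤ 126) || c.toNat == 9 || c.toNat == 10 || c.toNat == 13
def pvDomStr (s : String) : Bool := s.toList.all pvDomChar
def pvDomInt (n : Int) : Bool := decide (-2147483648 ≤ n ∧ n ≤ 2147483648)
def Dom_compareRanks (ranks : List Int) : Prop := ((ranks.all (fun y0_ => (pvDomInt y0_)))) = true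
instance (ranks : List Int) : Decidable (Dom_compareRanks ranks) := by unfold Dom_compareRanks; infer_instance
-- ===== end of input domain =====

-- B replaces sort+dict+two passes by a single comprehension (rank = 1 + #distinct smaller values); objective: simpler.


-- ===== PORT A =====
def compareRanks (ranks : List Int) : List Int :=
  -- values = sorted(set(ranks))
  let values : List Int := PySem.List.sorted (PySem.Set.ofList ranks) (fun x => x) false
  -- li = {}; i = 1; for num in values: li[num] = i; i += 1
  let li : PySem.Dict Int Int :=
    (values.foldl (fun (p : PySem.Dict Int Int × Int) num => (p.1.insert num p.2, p.2 + 1))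
      (PySem.Dict.empty, 1)).1
  -- result = []; for num in ranks: result.append(li[num])
  -- li[num]: the key is always present (num ∈ ranks ⊆ set(ranks) = keys), so getD 0 is exact
  ranks.foldl (fun result num => result ++ [li.getD num 0]) []

-- ===== PORT B =====
def compareRanks_alt (ranks : List Int) : List Int :=
  ranks.map (fun x =>
    PySem.Set.len (PySem.Set.ofList (ranks.filter (fun v => decide (v < x)))) + 1)

-- ===== PRECONDITION & SPEC =====
def Spec_compareRanks (ranks : List Int) (out : List Int) : Prop := out = compareRanks_alt ranks
instance (ranks : List Int) (out : List Int) : Decidable (Spec_compareRanks ranks out) := by unfold Spec_compareRanks; infer_instance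

-- ===== CLAIM (what is proved, stated in full; the proofs are below) =====
def Claim_equal_compareRanks : Prop := ∀ (ranks : List Int), Dom_compareRanks ranks → Spec_compareRanks ranks (compareRanks ranks)

-- ===== LEMMAS AND PROOFS =====

-- after the rank-assignment loop over keys not containing x, the lookup at x is unchanged
theorem rankFold_getD_not_mem (vs : List Int) (d : PySem.Dict Int Int) (i : Int) (x : Int)
    (hx : x ∉ vs) :
    ((vs.foldl (fun (p : PySem.Dict Int Int × Int) num => (p.1.insert num p.2, p.2 + 1))
      (d, i)).1).getD x 0 = d.getD x 0 := by
  induction vs generalizing d i with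
  | nil => rfl
  | cons v vs ih =>
    simp only [List.foldl_cons]
    rw [ih _ _ (fun h => hx (List.mem_cons_of_mem _ h)), PySem.Dict.getD_insert,
      if_neg (fun h : x = v => hx (h ▸ List.mem_cons_self))]

-- on a strictly increasing key list, A's rank loop assigns i + (number of earlier = smaller keys)
theorem rankFold_getD (vs : List Int) (d : PySem.Dict Int Int) (i : Int) (x : Int)
    (hx : x ∈ vs) (hp : vs.Pairwise (· < ·)) :
    ((vs.foldl (fun (p : PySem.Dict Int Int × Int) num => (p.1.insert num p.2, p.2 + 1))
      (d, i)).1).getD x 0 = i + ((vs.filter (fun v => decide (v < x))).length : Int) := by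
  induction vs generalizing d i with
  | nil => cases hx
  | cons v vs ih =>
    have hlt : ∀ w ∈ vs, v < w := fun w hw => List.rel_of_pairwise_cons hp hw
    simp only [List.foldl_cons]
    by_cases hxv : x = v
    · have hnm : x ∉ vs := fun h => absurd (hlt x h) (by rw [hxv]; exact lt_irrefl v)
      rw [rankFold_getD_not_mem _ _ _ _ hnm, PySem.Dict.getD_insert, if_pos hxv]
      have hf : (v :: vs).filter (fun v' => decide (v' < x)) = [] := by
        rw [List.filter_eq_nil_iff]
        intro a ha
        rcases List.mem_cons.mp ha with rfl | ha
        · simp [hxv]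
        · simp only [decide_eq_true_eq, not_lt]
          rw [hxv]
          exact le_of_lt (hlt a ha)
      rw [hf]
      simp
    · have hxvs : x ∈ vs := (List.mem_cons.mp hx).resolve_left hxv
      rw [ih _ _ hxvs hp.of_cons]
      have hvx : v < x := hlt x hxvs
      simp only [List.filter_cons, decide_eq_true hvx, if_pos, List.length_cons]
      push_cast
      ring

theorem compareRanks_eq (ranks : List Int) :
    compareRanks ranks = compareRanks_alt ranks := by
  unfold compareRanks compareRanks_alt
  rw [PySem.List.foldl_append_singleton_eq_map]
  simp only [List.nil_append]
  apply List.map_congr_left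
  intro x hx
  set vs := PySem.List.sorted (PySem.Set.ofList ranks) (fun x => x) false with hvs
  have hperm : vs.Perm (PySem.Set.ofList ranks) := PySem.List.sorted_perm _ _ _
  have hxvs : x ∈ vs := hperm.mem_iff.mpr ((PySem.Set.mem_ofList _ _).mpr hx)
  rw [rankFold_getD vs PySem.Dict.empty 1 x hxvs (PySem.List.sorted_ofList_pairwise_lt ranks)]
  -- vs.filter (< x) is a permutation of set(ranks).filter (< x), which is a permutation of
  -- set(ranks.filter (< x)): same distinct members, both Nodup
  have h1 : (vs.filter (fun v => decide (v < x))).length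
      = ((PySem.Set.ofList ranks).filter (fun v => decide (v < x))).length :=
    (hperm.filter _).length_eq
  have h2 : ((PySem.Set.ofList ranks).filter (fun v => decide (v < x))).Perm
      (PySem.Set.ofList (ranks.filter (fun v => decide (v < x)))) := by
    rw [List.perm_ext_iff_of_nodup
      ((PySem.Set.nodup_ofList ranks).filter _)
      (PySem.Set.nodup_ofList _)]
    intro a
    simp [List.mem_filter, PySem.Set.mem_ofList]
  rw [h1, h2.length_eq]
  have : PySem.Set.len (PySem.Set.ofList (ranks.filter (fun v => decide (v < x))))
      = ((PySem.Set.ofList (ranks.filter (fun v => decide (v < x)))).length : Int) := rfl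
  rw [this]
  ring

-- ===== VERDICT (by name: the statement is the Claim_ definition above) =====
theorem compareRanks_spec : Claim_equal_compareRanks := by
  intro ranks _
  unfold Spec_compareRanks
  exact compareRanks_eq ranks
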